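-- pv_equiv track=rewrite | github.com/NAllwood/CollegeOfLore | backend/api/linker.py | recursive_replace_substings_with_links
-- ===== SOURCE A (Python) =====
-- from typing import Any, Iterable, Tuple
--
-- def get_longest_matching_substring(text: str, substrings: Iterable) -> Tuple[str, int]:
--     """takes a sting and an Iterable of substrings and returns a tuple of the longest matching one and its index or (None, -1).
--
--     Args:
--         text (str): the text that should be searched for matches
--         substrings (Iterable): the substrings that should be searched for
--
--     Returns:
--         Tuple[str, int]: longest match as string + its index in the text or (None, -1)
--     """
--     subtexts = sorted(substrings, key=len)
--     longest_subtext = None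
--     longest_index = -1
--     for subtext in subtexts:
--         found_index = text.find(subtext)
--         # do not recursivley link links e.g. <a href="res"><a href="res">Res</a></a>
--         if text[found_index - 2 : found_index] == '">':
--             continue
--
--         # if we match something for the first time
--         # or we have already matched something, but also match a longer subtext at the same index
--         if found_index >= 0 and (longest_index == -1 or longest_index == found_index):
--             longest_subtext = subtext
--             longest_index = found_index
--
--     return (longest_subtext, longest_index)
--
-- def recursive_replace_substings_with_links(
--     original_text: str, substings: Iterable, resource_name: str
-- ) -> str:
--     """Replaces the longest matching occurrences of names in the original text with corresponding links
--
--     Args: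
--         original_text (str): the text in which the replacements should be made
--         substings (Iterable): an iterable of substrings that should be replaced by links in the text
--         resource_name (str): the name of the resource that should be linked
--
--     Returns:
--         str: the string in which all occurences of the substings are replaced by links
--     """
--     longest_matching_substring, _ = get_longest_matching_substring(
--         original_text, substings
--     )
--     if not longest_matching_substring:
--         return original_text
--
--     link = f'<a href="{resource_name}">{longest_matching_substring}</a>'
--     pre_text, _, post_text = original_text.partition(longest_matching_substring)
--     return (
--         pre_text
--         + link
--         + recursive_replace_substings_with_links(post_text, substings, resource_name)
--     )
-- ===== SOURCE B (Python) =====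
-- def get_longest_matching_substring(text, substrings):
--     candidates = [(s, text.find(s)) for s in sorted(substrings, key=len)]
--     candidates = [(s, i) for s, i in candidates if i >= 0 and text[i - 2 : i] != '">']
--     if not candidates:
--         return (None, -1)
--     best, first_index = candidates[0]
--     for s, i in candidates[1:]:
--         if i == first_index:
--             best = s
--     return (best, first_index)
--
--
-- def recursive_replace_substings_with_links(original_text, substings, resource_name):
--     parts = []
--     remaining = original_text
--     while True:
--         match, _ = get_longest_matching_substring(remaining, substings)
--         if not match:
--             parts.append(remaining)
--             break
--         pre_text, _, post_text = remaining.partition(match)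
--         parts.append(pre_text)
--         parts.append(f'<a href="{resource_name}">{match}</a>')
--         remaining = post_text
--     return "".join(parts)
-- ===== Notes on version B (the rewrite author's own statement) =====
-- stated objective: alternative
-- what changed: The tail recursion of recursive_replace_substings_with_links is replaced by an iterative loop that accumulates parts and joins them once, and the helper's guarded accumulator fold is replaced by building the filtered (substring, find-index) candidate list and scanning it for the last candidate at the first candidate's index.
import Mathlib
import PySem

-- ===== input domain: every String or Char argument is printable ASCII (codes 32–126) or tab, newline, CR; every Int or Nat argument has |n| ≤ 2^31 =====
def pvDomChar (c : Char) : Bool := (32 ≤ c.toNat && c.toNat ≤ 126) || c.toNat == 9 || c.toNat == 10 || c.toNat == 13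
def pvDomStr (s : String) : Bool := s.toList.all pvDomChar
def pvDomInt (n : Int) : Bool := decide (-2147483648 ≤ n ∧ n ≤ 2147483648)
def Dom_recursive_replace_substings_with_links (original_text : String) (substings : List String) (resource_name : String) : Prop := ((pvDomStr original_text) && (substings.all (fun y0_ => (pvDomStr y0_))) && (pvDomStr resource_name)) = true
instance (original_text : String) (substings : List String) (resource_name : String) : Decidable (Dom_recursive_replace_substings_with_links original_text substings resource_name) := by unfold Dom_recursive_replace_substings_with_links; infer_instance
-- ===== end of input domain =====

-- B replaces A's tail recursion by an iterative accumulate-and-join loop and A's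
-- guarded fold in the helper by a filter-then-scan over precomputed (substring, index)
-- candidates; same return value everywhere (objective: alternative decomposition).

-- ===== PORT A =====

-- hand-port of Python's str.partition(sep), returning (pre, post); exact: first
-- occurrence split, (text, "") when sep does not occur (both Pythons call it)
def pvPartition (text : String) (sep : String) : String × String :=
  let i := PySem.Str.find text sep
  if i < 0 then (text, "")
  else (PySem.Str.slice text none (some i),
        PySem.Str.slice text (some (i + PySem.Str.len sep)) none)

-- A's get_longest_matching_substring: a fold over the length-sorted substrings
-- carrying (longest_subtext, longest_index), with the '">' guard as `continue`
def pvGlmsA (text : String) (substrings : List String) : Option String × Int :=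
  (PySem.List.sorted substrings (fun s => PySem.Str.len s) false).foldl
    (fun st subtext =>
      let found := PySem.Str.find text subtext
      if PySem.Str.slice text (some (found - 2)) (some found) = "\">" then st
      else if 0 ≤ found ∧ (st.2 = -1 ∨ st.2 = found) then (some subtext, found)
      else st)
    (none, -1)

-- A's recursion; fuel (text length + 1) only makes the recursion structural:
-- every recursive call is on a strictly shorter post_text, so fuel never runs out
def pvRecA : Nat → String → List String → String → String
  | 0, text, _, _ => text
  | fuel+1, text, subs, rn =>
    match (pvGlmsA text subs).1 with
    | none => text
    | some m =>
      if m = "" then text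
      else
        let link := "<a href=\"" ++ rn ++ "\">" ++ m ++ "</a>"
        let p := pvPartition text m
        p.1 ++ link ++ pvRecA fuel p.2 subs rn

def recursive_replace_substings_with_links (original_text : String) (substings : List String) (resource_name : String) : String :=
  pvRecA (original_text.toList.length + 1) original_text substings resource_name

-- ===== PORT B =====

-- B's get_longest_matching_substring: build all (substring, find-index) candidates,
-- filter, then scan the tail for the last candidate sharing the first one's index
def pvGlmsB (text : String) (substrings : List String) : Option String × Int :=
  let candidates :=
    ((PySem.List.sorted substrings (fun s => PySem.Str.len s) false).map
      (fun s => (s, PySem.Str.find text s))).filter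
      (fun p => decide (0 ≤ p.2 ∧ ¬ PySem.Str.slice text (some (p.2 - 2)) (some p.2) = "\">"))
  match candidates with
  | [] => (none, -1)
  | (s0, i0) :: rest =>
      (some (rest.foldl (fun best p => if p.2 = i0 then p.1 else best) s0), i0)

-- B's `while True` loop accumulating parts; same fuel bound as A's recursion
def pvLoopB : Nat → String → List String → String → List String → List String
  | 0, text, _, _, parts => parts ++ [text]
  | fuel+1, text, subs, rn, parts =>
    match (pvGlmsB text subs).1 with
    | none => parts ++ [text]
    | some m =>
      if m = "" then parts ++ [text]
      else
        let p := pvPartition text m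
        pvLoopB fuel p.2 subs rn
          (parts ++ [p.1, "<a href=\"" ++ rn ++ "\">" ++ m ++ "</a>"])

def recursive_replace_substings_with_links_alt (original_text : String) (substings : List String) (resource_name : String) : String :=
  PySem.Str.join "" (pvLoopB (original_text.toList.length + 1) original_text substings resource_name [])

-- ===== PRECONDITION & SPEC =====
def Spec_recursive_replace_substings_with_links (original_text : String) (substings : List String) (resource_name : String) (out : String) : Prop := out = recursive_replace_substings_with_links_alt original_text substings resource_name
instance (original_text : String) (substings : List String) (resource_name : String) (out : String) : Decidable (Spec_recursive_replace_substings_with_links original_text substings resource_name out) := by unfold Spec_recursive_replace_substings_with_links; infer_instance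

-- ===== CLAIM (what is proved, stated in full; the proofs are below) =====
def Claim_equal_recursive_replace_substings_with_links : Prop := ∀ (original_text : String) (substings : List String) (resource_name : String), Dom_recursive_replace_substings_with_links original_text substings resource_name → Spec_recursive_replace_substings_with_links original_text substings resource_name (recursive_replace_substings_with_links original_text substings resource_name)

-- ===== LEMMAS AND PROOFS =====

-- abbreviation used by the lemmas: Python's text.find(s) (Str.find unfolds to this)
def pvFind (text s : String) : Int := PySem.Chars.find text.toList s.toList

-- the filtered candidate list B builds, for an arbitrary substring list l
def pvCand (text : String) (l : List String) : List (String × Int) :=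
  (l.map (fun s => (s, pvFind text s))).filter
    (fun p => decide (0 ≤ p.2 ∧ ¬ PySem.Str.slice text (some (p.2 - 2)) (some p.2) = "\">"))

theorem pvCand_cons (text : String) (s : String) (t : List String) :
    pvCand text (s :: t) =
      (if 0 ≤ pvFind text s ∧
          ¬ PySem.Str.slice text (some (pvFind text s - 2)) (some (pvFind text s)) = "\">"
       then [(s, pvFind text s)] else []) ++ pvCand text t := by
  by_cases h : 0 ≤ pvFind text s ∧
      ¬ PySem.Str.slice text (some (pvFind text s - 2)) (some (pvFind text s)) = "\">" <;>
    simp [pvCand, h]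

-- after the first acceptance A only overwrites at the same index; that is B's scan
theorem pvGlms_aux2 (text : String) (l : List String) (s0 : String) (i0 : Int)
    (h0 : 0 ≤ i0) :
    l.foldl
      (fun st subtext =>
        if PySem.Str.slice text (some (pvFind text subtext - 2)) (some (pvFind text subtext)) = "\">" then st
        else if 0 ≤ pvFind text subtext ∧ (st.2 = -1 ∨ st.2 = pvFind text subtext) then (some subtext, pvFind text subtext)
        else st)
      (some s0, i0)
    = (some ((pvCand text l).foldl (fun best p => if p.2 = i0 then p.1 else best) s0), i0) := by
  induction l generalizing s0 with
  | nil => simp [pvCand]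
  | cons s t ih =>
    rw [pvCand_cons]
    simp only [List.foldl_cons]
    by_cases hs : PySem.Str.slice text (some (pvFind text s - 2)) (some (pvFind text s)) = "\">"
    · simp [hs, ih s0]
    · by_cases hf : 0 ≤ pvFind text s
      · by_cases heq : pvFind text s = i0
        · have hne : ¬ i0 = (-1 : Int) := by omega
          rw [heq] at hs hf
          simp [hs, hf, hne, heq, ih s]
        · have hne : ¬ i0 = (-1 : Int) := by omega
          have hne2 : ¬ i0 = pvFind text s := fun h => heq h.symm
          simp [hs, hf, hne, hne2, heq, ih s0]
      · simp [hs, hf, ih s0]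

-- before the first acceptance A's fold state is (none, -1); B's first candidate is
-- exactly A's first accepted substring
theorem pvGlms_aux1 (text : String) (l : List String) :
    l.foldl
      (fun st subtext =>
        if PySem.Str.slice text (some (pvFind text subtext - 2)) (some (pvFind text subtext)) = "\">" then st
        else if 0 ≤ pvFind text subtext ∧ (st.2 = -1 ∨ st.2 = pvFind text subtext) then (some subtext, pvFind text subtext)
        else st)
      (none, -1)
    = (match pvCand text l with
       | [] => (none, -1)
       | (s0, i0) :: rest =>
          (some (rest.foldl (fun best p => if p.2 = i0 then p.1 else best) s0), i0)) := by
  induction l with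
  | nil => simp [pvCand]
  | cons s t ih =>
    rw [pvCand_cons]
    simp only [List.foldl_cons]
    by_cases hs : PySem.Str.slice text (some (pvFind text s - 2)) (some (pvFind text s)) = "\">"
    · simp [hs, ih]
    · by_cases hf : 0 ≤ pvFind text s
      · have h2 := pvGlms_aux2 text t s (pvFind text s) hf
        simp [hs, hf, h2]
      · simp [hs, hf, ih]

theorem pvGlms_eq (text : String) (subs : List String) :
    pvGlmsA text subs = pvGlmsB text subs := by
  unfold pvGlmsA pvGlmsB
  simp only [PySem.Str.find_eq]
  exact pvGlms_aux1 text (PySem.List.sorted subs (fun s => PySem.Str.len s) false)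

-- "".join is concatenation
theorem pvCharsJoin_nil_flatten (as : List (List Char)) :
    PySem.Chars.join [] as = as.flatten := by
  induction as with
  | nil => simp [PySem.Chars.join_nil]
  | cons a as ih =>
    cases as with
    | nil => simp [PySem.Chars.join_singleton]
    | cons b bs => rw [PySem.Chars.join_cons_cons, ih]; simp

theorem pvJoin_append (xs ys : List String) :
    PySem.Str.join "" (xs ++ ys) = PySem.Str.join "" xs ++ PySem.Str.join "" ys := by
  apply String.toList_inj.mp
  simp [pvCharsJoin_nil_flatten]

theorem pvJoin_single (a : String) : PySem.Str.join "" [a] = a := by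
  apply String.toList_inj.mp
  simp

theorem pvJoin_nil : PySem.Str.join "" [] = "" := by
  apply String.toList_inj.mp
  simp

-- the loop with accumulator `parts` computes join parts ++ (A's recursion)
theorem pvLoop_join (subs : List String) (rn : String) :
    ∀ (fuel : Nat) (text : String) (parts : List String),
      PySem.Str.join "" (pvLoopB fuel text subs rn parts)
        = PySem.Str.join "" parts ++ pvRecA fuel text subs rn := by
  intro fuel
  induction fuel with
  | zero =>
    intro text parts
    simp [pvLoopB, pvRecA, pvJoin_append, pvJoin_single]
  | succ fuel ih =>
    intro text parts
    simp only [pvLoopB, pvRecA, ← pvGlms_eq]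
    cases h : (pvGlmsA text subs).1 with
    | none => simp [pvJoin_append, pvJoin_single]
    | some m =>
      by_cases hm : m = ""
      · simp [hm, pvJoin_append, pvJoin_single]
      · simp only [hm, if_false]
        rw [ih]
        have h2 : ([(pvPartition text m).1,
            "<a href=\"" ++ rn ++ "\">" ++ m ++ "</a>"] : List String)
            = [(pvPartition text m).1] ++ ["<a href=\"" ++ rn ++ "\">" ++ m ++ "</a>"] := rfl
        rw [pvJoin_append, h2, pvJoin_append, pvJoin_single, pvJoin_single]
        simp [String.append_assoc]

-- ===== VERDICT (by name: the statement is the Claim_ definition above) =====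
theorem recursive_replace_substings_with_links_spec : Claim_equal_recursive_replace_substings_with_links := by
  intro t subs rn _
  unfold Spec_recursive_replace_substings_with_links
  unfold recursive_replace_substings_with_links recursive_replace_substings_with_links_alt
  rw [pvLoop_join, pvJoin_nil]
  simp
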